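-- pv_equiv track=rewrite | github.com/MrGmo/codeWars-Python | 8kyu/find-the-first-non-consecutive-number.py | first_non_consecutive
-- ===== SOURCE A (Python) =====
-- def first_non_consecutive(arr):
--     if len(arr) < 2:
--         return None
--
--     for i in range(len(arr)-1):
--       diff = arr[i+1] - arr[i]
--       if diff != 1:
--         return arr[i+1]
--     return None
-- ===== SOURCE B (Python) =====
-- def first_non_consecutive(arr):
--     # Divide and conquer over the index pairs (i, i+1) for lo <= i < hi:
--     # the first breaking pair in [lo, hi) is the one in the left half if any,
--     # else the one in the right half.
--     def solve(lo, hi):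
--         if hi <= lo:
--             return None
--         if hi - lo == 1:
--             return arr[lo + 1] if arr[lo + 1] - arr[lo] != 1 else None
--         mid = (lo + hi) // 2
--         left = solve(lo, mid)
--         return left if left is not None else solve(mid, hi)
--
--     if len(arr) < 2:
--         return None
--     return solve(0, len(arr) - 1)
-- ===== Notes on version B (the rewrite author's own statement) =====
-- stated objective: alternative
-- what changed: B replaces A's left-to-right early-return scan by a recursive divide-and-conquer over index ranges: it splits [lo,hi) at the midpoint, solves the left half first and falls back to the right half, returning the successor of the first breaking adjacent pair.
import Mathlib
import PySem

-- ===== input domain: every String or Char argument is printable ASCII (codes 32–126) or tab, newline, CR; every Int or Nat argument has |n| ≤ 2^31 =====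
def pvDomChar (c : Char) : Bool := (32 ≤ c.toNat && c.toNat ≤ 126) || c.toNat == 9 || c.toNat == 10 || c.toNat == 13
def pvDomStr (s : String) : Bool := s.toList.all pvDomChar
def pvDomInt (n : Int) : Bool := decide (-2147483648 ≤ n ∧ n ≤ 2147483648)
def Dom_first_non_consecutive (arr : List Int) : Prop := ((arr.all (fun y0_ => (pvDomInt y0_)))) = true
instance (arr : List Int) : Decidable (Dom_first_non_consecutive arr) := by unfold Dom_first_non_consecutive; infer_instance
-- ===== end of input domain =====

-- B replaces A's left-to-right early-return scan by a divide-and-conquer recursion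
-- over index ranges (left half first, then right half); objective: alternative.

-- ===== PORT A =====
-- A's loop 'for i in range(len(arr)-1)' with arr[i], arr[i+1] (indices always in range,
-- so pyGetD is exact here):
def fncLoop (arr : List Int) : List Int → Option Int
  | [] => none
  | i :: rest =>
    if PySem.List.pyGetD arr (i + 1) 0 - PySem.List.pyGetD arr i 0 ≠ 1 then
      some (PySem.List.pyGetD arr (i + 1) 0)
    else fncLoop arr rest

def first_non_consecutive (arr : List Int) : Option Int :=
  if arr.length < 2 then none
  else fncLoop arr (PySem.List.pyRange 0 ((arr.length : Int) - 1) 1)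

-- ===== PORT B =====
-- Source B's solve(lo, hi): the first 'hi <= lo' base case, '//' as floordiv and the
-- in-range arr[lo], arr[lo+1] as pyGetD are exact for the arguments Source B passes.
def fncSolve (arr : List Int) (lo hi : Int) : Option Int :=
  if _h0 : hi ≤ lo then none
  else if _h1 : hi - lo = 1 then
    if PySem.List.pyGetD arr (lo + 1) 0 - PySem.List.pyGetD arr lo 0 ≠ 1 then
      some (PySem.List.pyGetD arr (lo + 1) 0)
    else none
  else
    match fncSolve arr lo (PySem.Int.floordiv (lo + hi) 2) with
    | some v => some v
    | none => fncSolve arr (PySem.Int.floordiv (lo + hi) 2) hi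
termination_by (hi - lo).toNat
decreasing_by
  · have := PySem.Int.floordiv_two_mid_bounds (le_of_lt (by omega : lo < hi))
    have h2 : PySem.Int.floordiv (lo + hi) 2 = (lo + hi) / 2 :=
      PySem.Int.floordiv_eq_ediv_of_pos (by omega)
    omega
  · have := PySem.Int.floordiv_two_mid_bounds (le_of_lt (by omega : lo < hi))
    have h2 : PySem.Int.floordiv (lo + hi) 2 = (lo + hi) / 2 :=
      PySem.Int.floordiv_eq_ediv_of_pos (by omega)
    omega

def first_non_consecutive_alt (arr : List Int) : Option Int :=
  if arr.length < 2 then none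
  else fncSolve arr 0 ((arr.length : Int) - 1)

-- ===== PRECONDITION & SPEC =====
def Spec_first_non_consecutive (arr : List Int) (out : Option Int) : Prop := out = first_non_consecutive_alt arr
instance (arr : List Int) (out : Option Int) : Decidable (Spec_first_non_consecutive arr out) := by unfold Spec_first_non_consecutive; infer_instance

-- ===== CLAIM (what is proved, stated in full; the proofs are below) =====
def Claim_equal_first_non_consecutive : Prop := ∀ (arr : List Int), Dom_first_non_consecutive arr → Spec_first_non_consecutive arr (first_non_consecutive arr)

-- ===== LEMMAS AND PROOFS =====

-- Reference linear scan over the index interval [lo, hi), used to relate both ports.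
def fncScan (arr : List Int) (lo hi : Int) : Option Int :=
  if _h : hi ≤ lo then none
  else
    if PySem.List.pyGetD arr (lo + 1) 0 - PySem.List.pyGetD arr lo 0 ≠ 1 then
      some (PySem.List.pyGetD arr (lo + 1) 0)
    else fncScan arr (lo + 1) hi
termination_by (hi - lo).toNat
decreasing_by omega

theorem fncScan_nil (arr : List Int) (lo hi : Int) (h : hi ≤ lo) : fncScan arr lo hi = none := by
  rw [fncScan, dif_pos h]

theorem fncScan_step (arr : List Int) (lo hi : Int) (h : ¬ hi ≤ lo) :
    fncScan arr lo hi =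
      (if PySem.List.pyGetD arr (lo + 1) 0 - PySem.List.pyGetD arr lo 0 ≠ 1 then
        some (PySem.List.pyGetD arr (lo + 1) 0)
      else fncScan arr (lo + 1) hi) := by
  rw [fncScan, dif_neg h]

-- A's loop over range(lo, hi) is the linear scan.
theorem fncLoop_eq_fncScan (arr : List Int) (lo hi : Int) :
    fncLoop arr (PySem.List.pyRange lo hi 1) = fncScan arr lo hi := by
  by_cases h : hi ≤ lo
  · rw [PySem.List.pyRange_one_eq_nil h, fncScan_nil arr lo hi h]
    simp [fncLoop]
  · rw [PySem.List.pyRange_one_cons (by omega : lo < hi), fncScan_step arr lo hi h]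
    simp only [fncLoop]
    split_ifs with hb
    · rfl
    · exact fncLoop_eq_fncScan arr (lo + 1) hi
termination_by (hi - lo).toNat
decreasing_by omega

-- The linear scan splits at any midpoint: left part first, then the right part.
theorem fncScan_split (arr : List Int) (lo mid hi : Int) (h1 : lo ≤ mid) (h2 : mid ≤ hi) :
    fncScan arr lo hi =
      (match fncScan arr lo mid with
       | some v => some v
       | none => fncScan arr mid hi) := by
  by_cases hlm : mid ≤ lo
  · have heq : mid = lo := le_antisymm hlm h1
    subst heq
    rw [fncScan_nil arr mid mid le_rfl]
  · have hnl : ¬ hi ≤ lo := by omega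
    rw [fncScan_step arr lo hi hnl, fncScan_step arr lo mid hlm]
    split_ifs with hb
    · rfl
    · exact fncScan_split arr (lo + 1) mid hi (by omega) h2
termination_by (mid - lo).toNat
decreasing_by omega

-- B's divide and conquer computes the linear scan.
theorem fncSolve_eq_fncScan (arr : List Int) (lo hi : Int) :
    fncSolve arr lo hi = fncScan arr lo hi := by
  rw [fncSolve]
  by_cases h0 : hi ≤ lo
  · rw [dif_pos h0, fncScan_nil arr lo hi h0]
  · rw [dif_neg h0]
    by_cases h1 : hi - lo = 1
    · rw [dif_pos h1, fncScan_step arr lo hi h0]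
      split_ifs with hb
      · rfl
      · rw [fncScan_nil arr (lo + 1) hi (by omega)]
    · rw [dif_neg h1]
      have hmid := PySem.Int.floordiv_two_mid_bounds (le_of_lt (by omega : lo < hi))
      rw [fncSolve_eq_fncScan arr lo _, fncSolve_eq_fncScan arr _ hi]
      exact (fncScan_split arr lo _ hi hmid.1 hmid.2).symm
termination_by (hi - lo).toNat
decreasing_by
  · have h2 : PySem.Int.floordiv (lo + hi) 2 = (lo + hi) / 2 :=
      PySem.Int.floordiv_eq_ediv_of_pos (by omega)
    omega
  · have h2 : PySem.Int.floordiv (lo + hi) 2 = (lo + hi) / 2 :=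
      PySem.Int.floordiv_eq_ediv_of_pos (by omega)
    omega

-- ===== VERDICT (by name: the statement is the Claim_ definition above) =====
theorem first_non_consecutive_spec : Claim_equal_first_non_consecutive := by
  intro arr _
  unfold Spec_first_non_consecutive first_non_consecutive first_non_consecutive_alt
  by_cases h : arr.length < 2
  · simp [h]
  · rw [if_neg h, if_neg h, fncLoop_eq_fncScan, fncSolve_eq_fncScan]
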